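-- pv_equiv track=rewrite | github.com/BrianCrafty/TheNetspaces | ExternalPrograms/ColorsQuantisation/statisticsDialog.py | generate_label_list
-- ===== SOURCE A (Python) =====
-- def generate_label_list(intervals):
-- 	returnlist=[]
-- 	counter=0
-- 	for b in range(0,intervals[2]):
-- 		for g in range(0,intervals[1]):
-- 			for r in range(0,intervals[0]):
-- 				counter+=1
-- 				returnlist.append(counter)
-- 	return returnlist
-- ===== SOURCE B (Python) =====
-- def generate_label_list(intervals):
--     n = max(0, intervals[0]) * max(0, intervals[1]) * max(0, intervals[2])
--     return list(range(1, n + 1))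
-- ===== Notes on version B (the rewrite author's own statement) =====
-- stated objective: idiomatic
-- what changed: Replaces the triple nested counting loop and its accumulator with a closed-form product of the (clamped) interval sizes and a single list(range(1, n+1)).
import Mathlib
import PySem

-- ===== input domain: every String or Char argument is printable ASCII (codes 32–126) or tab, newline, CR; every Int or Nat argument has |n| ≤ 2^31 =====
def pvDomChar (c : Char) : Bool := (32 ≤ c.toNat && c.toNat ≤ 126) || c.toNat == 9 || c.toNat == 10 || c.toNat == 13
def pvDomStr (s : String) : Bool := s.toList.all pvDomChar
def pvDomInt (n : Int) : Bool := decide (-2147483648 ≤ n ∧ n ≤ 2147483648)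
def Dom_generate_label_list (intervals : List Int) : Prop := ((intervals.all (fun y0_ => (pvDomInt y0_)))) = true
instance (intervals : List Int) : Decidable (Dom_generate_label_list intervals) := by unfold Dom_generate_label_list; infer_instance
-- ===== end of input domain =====

-- B replaces A's triple nested counting loop by a closed-form product and a single range (idiomatic; same cost, the output dominates).

-- ===== PORT A =====
-- literal port of A: nested for-loops over range(0, intervals[2/1/0]), appending an
-- incremented counter; indexing is pyGetD (Pre_ guarantees the indices are in range)
def generate_label_list (intervals : List Int) : List Int :=
  (((PySem.List.pyRange 0 (PySem.List.pyGetD intervals 2 0) 1).foldl (fun (s : List Int × Int) _ =>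
      (PySem.List.pyRange 0 (PySem.List.pyGetD intervals 1 0) 1).foldl (fun s _ =>
        (PySem.List.pyRange 0 (PySem.List.pyGetD intervals 0 0) 1).foldl (fun s _ =>
          (s.1 ++ [s.2 + 1], s.2 + 1)) s) s) ([], 0)).1)

-- ===== PORT B =====
-- literal port of B: n = max(0,i0)*max(0,i1)*max(0,i2); list(range(1, n+1))
def generate_label_list_alt (intervals : List Int) : List Int :=
  let n := max 0 (PySem.List.pyGetD intervals 0 0) * max 0 (PySem.List.pyGetD intervals 1 0)
             * max 0 (PySem.List.pyGetD intervals 2 0)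
  PySem.List.pyRange 1 (n + 1) 1

-- ===== PRECONDITION & SPEC =====
-- A raises IndexError when len(intervals) < 3 (intervals[2] is evaluated first); excluded.
def Pre_generate_label_list (intervals : List Int) : Prop := 3 ≤ intervals.length
instance (intervals : List Int) : Decidable (Pre_generate_label_list intervals) := by
  unfold Pre_generate_label_list; infer_instance
def pvWitness_generate_label_list : List Int := [2, 3, 2]

def Spec_generate_label_list (intervals : List Int) (out : List Int) : Prop := out = generate_label_list_alt intervals
instance (intervals : List Int) (out : List Int) : Decidable (Spec_generate_label_list intervals out) := by unfold Spec_generate_label_list; infer_instance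

-- ===== CLAIM (what is proved, stated in full; the proofs are below) =====
def Claim_equal_generate_label_list : Prop := ∀ (intervals : List Int), Dom_generate_label_list intervals → Pre_generate_label_list intervals → Spec_generate_label_list intervals (generate_label_list intervals)

-- ===== LEMMAS AND PROOFS =====

-- Folding any list with a step that appends a block of k consecutive counters (and
-- advances the counter by k) appends l.length * k consecutive counters in total.
theorem pv_fold_block {α : Type} (k : Nat) (f : List Int × Int → α → List Int × Int)
    (hf : ∀ (rl : List Int) (c : Int) (x : α),
      f (rl, c) x = (rl ++ PySem.List.pyRange (c + 1) (c + k + 1) 1, c + k)) :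
    ∀ (l : List α) (rl : List Int) (c : Int),
      l.foldl f (rl, c)
        = (rl ++ PySem.List.pyRange (c + 1) (c + (l.length * k : Nat) + 1) 1,
           c + (l.length * k : Nat)) := by
  intro l
  induction l with
  | nil =>
      intro rl c
      rw [List.foldl_nil, PySem.List.pyRange_one_eq_nil (by simp)]
      simp
  | cons x t ih =>
      intro rl c
      simp only [List.foldl_cons, hf, ih, Prod.mk.injEq, List.length_cons]
      constructor
      · rw [List.append_assoc,
          ← PySem.List.pyRange_one_append (c + 1) (c + k + 1) (c + k + ((t.length * k : Nat)) + 1)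
            (by omega) (by omega)]
        congr 1
        push_cast
        ring
      · push_cast; ring

theorem generate_label_list_eq (intervals : List Int)
    (_h : Pre_generate_label_list intervals) :
    generate_label_list intervals = generate_label_list_alt intervals := by
  unfold generate_label_list generate_label_list_alt
  set i0 := PySem.List.pyGetD intervals 0 0
  set i1 := PySem.List.pyGetD intervals 1 0
  set i2 := PySem.List.pyGetD intervals 2 0
  -- innermost loop: k = 1
  have h1 : ∀ (rl : List Int) (c : Int),
      (PySem.List.pyRange 0 i0 1).foldl
        (fun (s : List Int × Int) _ => (s.1 ++ [s.2 + 1], s.2 + 1)) (rl, c)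
        = (rl ++ PySem.List.pyRange (c + 1) (c + (i0.toNat : Int) + 1) 1, c + (i0.toNat : Int)) := by
    intro rl c
    have := pv_fold_block 1 (fun (s : List Int × Int) (_ : Int) => (s.1 ++ [s.2 + 1], s.2 + 1))
      (by intro rl c x
          rw [PySem.List.pyRange_one_cons (by omega), PySem.List.pyRange_one_eq_nil (by omega)]
          simp)
      (PySem.List.pyRange 0 i0 1) rl c
    simpa [PySem.List.length_pyRange_one] using this
  -- middle loop: k = i0.toNat
  have h2 : ∀ (rl : List Int) (c : Int),
      (PySem.List.pyRange 0 i1 1).foldl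
        (fun (s : List Int × Int) _ =>
          (PySem.List.pyRange 0 i0 1).foldl
            (fun s _ => (s.1 ++ [s.2 + 1], s.2 + 1)) s) (rl, c)
        = (rl ++ PySem.List.pyRange (c + 1) (c + ((i1.toNat * i0.toNat : Nat) : Int) + 1) 1,
           c + ((i1.toNat * i0.toNat : Nat) : Int)) := by
    intro rl c
    have := pv_fold_block i0.toNat
      (fun (s : List Int × Int) (_ : Int) =>
        (PySem.List.pyRange 0 i0 1).foldl (fun s _ => (s.1 ++ [s.2 + 1], s.2 + 1)) s)
      (by intro rl c x; exact h1 rl c)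
      (PySem.List.pyRange 0 i1 1) rl c
    simpa [PySem.List.length_pyRange_one] using this
  -- outer loop: k = i1.toNat * i0.toNat
  have h3 := pv_fold_block (i1.toNat * i0.toNat)
    (fun (s : List Int × Int) (_ : Int) =>
      (PySem.List.pyRange 0 i1 1).foldl
        (fun s _ =>
          (PySem.List.pyRange 0 i0 1).foldl
            (fun s _ => (s.1 ++ [s.2 + 1], s.2 + 1)) s) s)
    (by intro rl c x; exact h2 rl c)
    (PySem.List.pyRange 0 i2 1) [] 0
  simp only [h3, PySem.List.length_pyRange_one, List.nil_append, Int.sub_zero]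
  have hcast : ((i2.toNat * (i1.toNat * i0.toNat) : Nat) : Int)
      = max 0 i0 * max 0 i1 * max 0 i2 := by
    push_cast
    simp only [Int.toNat_eq_max, Int.max_comm]
    ring
  rw [show ((0:Int) + ((i2.toNat * (i1.toNat * i0.toNat) : Nat) : Int) + 1)
        = max 0 i0 * max 0 i1 * max 0 i2 + 1 by rw [hcast]; ring,
      show ((0:Int) + 1) = 1 by norm_num]

-- ===== VERDICT (by name: the statement is the Claim_ definition above) =====
theorem generate_label_list_spec : Claim_equal_generate_label_list := by
  intro intervals _ hpre
  exact generate_label_list_eq intervals hpre
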